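-- pv_equiv track=rewrite | github.com/mar7799/Email-Generator | email_generator_ui.py | _count_progress
-- ===== SOURCE A (Python) =====
-- def _count_progress(rows: list[dict[str, str]]) -> tuple[int, int, int | None]:
--     total = len([row for row in rows if row.get("email", "").strip()])
--     completed = len([row for row in rows if row.get("email", "").strip() and row.get("completed", "").strip()])
--     next_pending = None
--     for idx, row in enumerate(rows):
--         if row.get("email", "").strip() and not row.get("completed", "").strip():
--             next_pending = idx + 1
--             break
--     return total, completed, next_pending
-- ===== SOURCE B (Python) =====
-- def _count_progress(rows: list[dict[str, str]]) -> tuple[int, int, int | None]: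
--     total = 0
--     completed = 0
--     next_pending = None
--     for idx, row in enumerate(rows):
--         email = row.get("email", "").strip()
--         done = row.get("completed", "").strip()
--         if email:
--             total += 1
--             if done:
--                 completed += 1
--             elif next_pending is None:
--                 next_pending = idx + 1
--     return total, completed, next_pending
-- ===== Notes on version B (the rewrite author's own statement) =====
-- stated objective: simpler
-- what changed: Fuses A's three separate passes (two filtering list comprehensions plus a break-out search loop) into a single accumulator loop that strips each row's fields once and tracks total, completed and the first pending index together.
import Mathlib
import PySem

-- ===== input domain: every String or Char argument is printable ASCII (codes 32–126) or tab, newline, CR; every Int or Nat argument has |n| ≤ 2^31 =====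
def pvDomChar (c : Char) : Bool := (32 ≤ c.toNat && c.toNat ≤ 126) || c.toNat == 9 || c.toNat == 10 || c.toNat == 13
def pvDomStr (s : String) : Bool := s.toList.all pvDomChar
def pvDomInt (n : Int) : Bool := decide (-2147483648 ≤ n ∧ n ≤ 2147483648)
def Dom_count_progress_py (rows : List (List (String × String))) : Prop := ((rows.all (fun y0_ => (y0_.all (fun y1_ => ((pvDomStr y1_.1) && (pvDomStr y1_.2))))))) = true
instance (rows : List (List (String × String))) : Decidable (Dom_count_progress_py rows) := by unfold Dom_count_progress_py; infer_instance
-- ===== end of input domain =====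

-- B fuses A's three passes into one accumulator loop; objective: simpler (same O(n) cost).

-- shared accessor: row.get(k, "") on the association-list image of a Python dict
def pvGet (row : List (String × String)) (k : String) : String :=
  (PySem.Dict.ofList row).getD k ""

-- ===== PORT A =====
-- row.get("email","").strip() truthiness
def pvEmailOk (row : List (String × String)) : Bool :=
  PySem.Str.strip (pvGet row "email") != ""

def pvDoneOk (row : List (String × String)) : Bool :=
  PySem.Str.strip (pvGet row "completed") != ""

-- the for/enumerate loop with its break
def pvFindPending : List (List (String × String)) → Int → Option Int
  | [], _ => none
  | row :: rest, idx =>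
    if pvEmailOk row && !pvDoneOk row then some (idx + 1)
    else pvFindPending rest (idx + 1)

def count_progress_py (rows : List (List (String × String))) : Int × Int × Option Int :=
  let total : Int := (rows.filter (fun row => pvEmailOk row)).length
  let completed : Int := (rows.filter (fun row => pvEmailOk row && pvDoneOk row)).length
  (total, completed, pvFindPending rows 0)

-- ===== PORT B =====
-- single pass carrying (total, completed, next_pending) and the running index
def pvLoopB : List (List (String × String)) → Int → Int → Option Int → Int → Int × Int × Option Int
  | [], total, completed, np, _ => (total, completed, np)
  | row :: rest, total, completed, np, idx =>
    let email := PySem.Str.strip (pvGet row "email")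
    let done := PySem.Str.strip (pvGet row "completed")
    if email != "" then
      if done != "" then pvLoopB rest (total + 1) (completed + 1) np (idx + 1)
      else pvLoopB rest (total + 1) completed (if np.isNone then some (idx + 1) else np) (idx + 1)
    else pvLoopB rest total completed np (idx + 1)

def count_progress_py_alt (rows : List (List (String × String))) : Int × Int × Option Int :=
  pvLoopB rows 0 0 none 0

-- ===== PRECONDITION & SPEC =====
def Spec_count_progress_py (rows : List (List (String × String))) (out : Int × Int × Option Int) : Prop := out = count_progress_py_alt rows
instance (rows : List (List (String × String))) (out : Int × Int × Option Int) : Decidable (Spec_count_progress_py rows out) := by unfold Spec_count_progress_py; infer_instance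

-- ===== CLAIM (what is proved, stated in full; the proofs are below) =====
def Claim_equal_count_progress_py : Prop := ∀ (rows : List (List (String × String))), Dom_count_progress_py rows → Spec_count_progress_py rows (count_progress_py rows)

-- ===== LEMMAS AND PROOFS =====

lemma pvLoopB_eq (l : List (List (String × String))) (t c : Int) (np : Option Int) (i : Int) :
    pvLoopB l t c np i =
      (t + ((l.filter (fun row => pvEmailOk row)).length : Int),
       c + ((l.filter (fun row => pvEmailOk row && pvDoneOk row)).length : Int),
       match np with
       | some v => some v
       | none => pvFindPending l i) := by
  induction l generalizing t c np i with
  | nil => cases np <;> simp [pvLoopB, pvFindPending]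
  | cons row rest ih =>
    simp only [pvLoopB, pvFindPending, pvEmailOk, pvDoneOk]
    by_cases he : PySem.Str.strip (pvGet row "email") = "" <;>
      by_cases hd : PySem.Str.strip (pvGet row "completed") = "" <;>
        cases np <;>
          simp [he, hd, ih, pvEmailOk, pvDoneOk] <;> omega

-- ===== VERDICT (by name: the statement is the Claim_ definition above) =====
theorem count_progress_py_spec : Claim_equal_count_progress_py := by
  intro rows _
  unfold Spec_count_progress_py count_progress_py count_progress_py_alt
  rw [pvLoopB_eq]
  simp
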